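-- pv_equiv track=rewrite | github.com/fedorovVNpin221/Python_Beginning_Course | homework_4/diana/homework5-6.py | find_min_of_minima
-- ===== SOURCE A (Python) =====
-- def find_min_of_minima(lists_of_lists):
--     minimum = []
--     for sublist in lists_of_lists:
--         if sublist:
--             minimum.append(min(sublist))
--     if minimum:
--         return min(minimum)
--     else:
--         return None
-- ===== SOURCE B (Python) =====
-- def find_min_of_minima(lists_of_lists):
--     best = None
--     for sublist in lists_of_lists:
--         for x in sublist:
--             if best is None or x < best:
--                 best = x
--     return best
-- ===== Notes on version B (the rewrite author's own statement) =====
-- stated objective: simpler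
-- what changed: Replaces the two-phase min-of-per-sublist-minima (building an intermediate list of minima, then min over it) with a single flat pass keeping one running-minimum accumulator over every element.
import Mathlib
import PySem

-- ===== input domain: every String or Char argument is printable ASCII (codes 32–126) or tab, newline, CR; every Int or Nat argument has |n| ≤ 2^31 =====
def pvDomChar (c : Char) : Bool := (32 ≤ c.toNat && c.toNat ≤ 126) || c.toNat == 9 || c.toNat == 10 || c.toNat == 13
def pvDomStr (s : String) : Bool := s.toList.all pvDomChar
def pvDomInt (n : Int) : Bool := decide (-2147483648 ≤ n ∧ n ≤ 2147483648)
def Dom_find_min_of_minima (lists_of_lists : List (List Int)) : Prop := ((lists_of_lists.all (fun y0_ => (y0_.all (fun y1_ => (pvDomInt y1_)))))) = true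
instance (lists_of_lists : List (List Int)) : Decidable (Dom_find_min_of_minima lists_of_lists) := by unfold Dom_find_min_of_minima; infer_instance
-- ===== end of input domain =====

-- B replaces A's two-phase min-of-per-sublist-minima with a single flat running-minimum pass (simpler, O(1) extra space).


-- ===== PORT A =====
-- minimum.append(min(sublist)) : min(sublist) is only evaluated when sublist is nonempty,
-- so (PySem.List.min? sublist id).getD 0 is exact there (the default is never taken).
def find_min_of_minima (lists_of_lists : List (List Int)) : Option Int :=
  let minimum := lists_of_lists.foldl
    (fun acc sublist =>
      if sublist ≠ [] then acc ++ [(PySem.List.min? sublist (fun x => x)).getD 0] else acc) []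
  if minimum ≠ [] then PySem.List.min? minimum (fun x => x) else none

-- ===== PORT B =====
-- if best is None or x < best: best = x
def pvMinStep (best : Option Int) (x : Int) : Option Int :=
  match best with
  | none => some x
  | some m => if x < m then some x else some m

def find_min_of_minima_alt (lists_of_lists : List (List Int)) : Option Int :=
  lists_of_lists.foldl (fun best sublist => sublist.foldl pvMinStep best) none

-- ===== PRECONDITION & SPEC =====
def Spec_find_min_of_minima (lists_of_lists : List (List Int)) (out : Option Int) : Prop := out = find_min_of_minima_alt lists_of_lists
instance (lists_of_lists : List (List Int)) (out : Option Int) : Decidable (Spec_find_min_of_minima lists_of_lists out) := by unfold Spec_find_min_of_minima; infer_instance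

-- ===== CLAIM (what is proved, stated in full; the proofs are below) =====
def Claim_equal_find_min_of_minima : Prop := ∀ (lists_of_lists : List (List Int)), Dom_find_min_of_minima lists_of_lists → Spec_find_min_of_minima lists_of_lists (find_min_of_minima lists_of_lists)

-- ===== LEMMAS AND PROOFS =====

theorem pvMinStep_some (a x : Int) : pvMinStep (some a) x = some (min a x) := by
  simp only [pvMinStep]
  split_ifs with h
  · rw [min_eq_right (le_of_lt h)]
  · rw [min_eq_left (by omega)]

theorem min?_id_nil : PySem.List.min? ([] : List Int) (fun x => x) = none := rfl

theorem foldl_pvMinStep_some (t : List Int) : ∀ (a : Int),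
    t.foldl pvMinStep (some a) = some (t.foldl min a) := by
  induction t with
  | nil => intro a; rfl
  | cons x t ih => intro a; simp only [List.foldl_cons, pvMinStep_some, ih]

theorem foldl_min_pull (t : List Int) : ∀ (a x : Int),
    t.foldl min (min a x) = min a (t.foldl min x) := by
  induction t with
  | nil => intro a x; rfl
  | cons y t ih =>
      intro a x
      simp only [List.foldl_cons, min_assoc, ih]

-- B's inner loop over a sublist, applied to the state "min? of A's collected minima",
-- equals that state after A's step for the same sublist.
theorem step_agree (acc : List Int) (sub : List Int) :
    sub.foldl pvMinStep (PySem.List.min? acc (fun x => x)) =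
      PySem.List.min? (if sub ≠ [] then acc ++ [(PySem.List.min? sub (fun x => x)).getD 0] else acc)
        (fun x => x) := by
  cases sub with
  | nil => simp
  | cons x t =>
      cases acc with
      | nil =>
          simp [min?_id_nil, PySem.List.min?_id_cons, foldl_pvMinStep_some, pvMinStep]
      | cons a s =>
          simp only [ne_eq, reduceCtorEq, not_false_eq_true, if_pos, PySem.List.min?_id_cons,
            Option.getD_some, List.cons_append, List.foldl_cons, List.foldl_append,
            foldl_pvMinStep_some, pvMinStep_some, foldl_min_pull, List.foldl_nil]

theorem main_invariant (l : List (List Int)) : ∀ (acc : List Int),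
    l.foldl (fun best sublist => sublist.foldl pvMinStep best) (PySem.List.min? acc (fun x => x)) =
      PySem.List.min?
        (l.foldl (fun a sublist =>
          if sublist ≠ [] then a ++ [(PySem.List.min? sublist (fun x => x)).getD 0] else a) acc)
        (fun x => x) := by
  induction l with
  | nil => intro acc; rfl
  | cons sub l ih =>
      intro acc
      simp only [List.foldl_cons, step_agree, ih]

-- ===== VERDICT (by name: the statement is the Claim_ definition above) =====
theorem find_min_of_minima_spec : Claim_equal_find_min_of_minima := by
  intro l _
  show find_min_of_minima l = find_min_of_minima_alt l
  have h0 : PySem.List.min? ([] : List Int) (fun x => x) = none := rfl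
  have h := main_invariant l []
  rw [h0] at h
  simp only [find_min_of_minima, find_min_of_minima_alt]
  rw [h]
  split_ifs with hne
  · rfl
  · rw [not_not.mp hne]
    exact h0.symm
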